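-- pv_equiv track=rewrite | github.com/rafaelperazzo/programacao-web | moodledata/vpl_data/97/usersdata/185/55878/submittedfiles/lecker.py | lacker
-- ===== SOURCE A (Python) =====
-- def lacker(lista):
--     cont=0
--     for i in range(0,len(lista),1):
--         if i==0:
--             if lista[i]>lista[i+1]:
--                 cont=cont+1
--         elif i==len(lista)-1:
--             if lista[i]>lista[i-1]:
--                 cont=cont+1
--         else:
--             if lista[i]>lista[i-1] and lista[i]>lista[i+1]:
--                 cont=cont+1
--     if cont==1:
--         return True
--     else:
--         return False
-- ===== SOURCE B (Python) =====
-- def lacker(lista):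
--     # Run-length encode the comparison signs of adjacent elements, then judge the
--     # (much shorter) sign-run sequence: a peak is a '>' run at the start or right
--     # after a '<' run, plus one at the right edge when the last run is '<'.
--     if len(lista) == 0:
--         return False
--     keys = []
--     for a, b in zip(lista, lista[1:]):
--         s = '<' if a < b else ('>' if a > b else '=')
--         if not keys or keys[-1] != s:
--             keys.append(s)
--     cont = 1 if keys[0] == '>' else 0
--     cont += sum(1 for p, k in zip(keys, keys[1:]) if p == '<' and k == '>')
--     if keys[-1] == '<':
--         cont += 1
--     return cont == 1
-- ===== Notes on version B (the rewrite author's own statement) =====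
-- stated objective: alternative
-- what changed: Instead of A's single indexed loop with first/middle/last branching, B run-length encodes the comparison signs of adjacent elements and then judges the run sequence: a peak is a '>' run at position 0 or immediately after a '<' run, plus one boundary peak when the final run is '<'.
import Mathlib
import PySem

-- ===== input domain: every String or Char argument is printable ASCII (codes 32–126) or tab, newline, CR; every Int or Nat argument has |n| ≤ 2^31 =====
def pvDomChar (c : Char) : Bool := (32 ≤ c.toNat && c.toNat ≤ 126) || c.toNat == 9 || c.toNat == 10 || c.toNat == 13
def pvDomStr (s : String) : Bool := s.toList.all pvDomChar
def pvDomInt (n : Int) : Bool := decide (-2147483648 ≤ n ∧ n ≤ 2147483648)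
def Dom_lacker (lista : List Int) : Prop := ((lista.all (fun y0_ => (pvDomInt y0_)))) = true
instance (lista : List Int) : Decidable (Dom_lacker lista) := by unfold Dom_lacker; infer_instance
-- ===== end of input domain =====

-- B replaces A's indexed loop (with first/middle/last branching) by run-length
-- encoding the comparison signs of adjacent elements and judging the run sequence
-- (objective: alternative algorithm, same cost).

-- ===== PORT A =====
-- A-side helper: the body of A's for-loop (cont is the accumulator, i the loop index)
def stepA (lista : List Int) (n : Int) (cont i : Int) : Int :=
  if i = 0 then
    (if PySem.List.pyGetD lista i 0 > PySem.List.pyGetD lista (i + 1) 0 then cont + 1 else cont)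
  else if i = n - 1 then
    (if PySem.List.pyGetD lista i 0 > PySem.List.pyGetD lista (i - 1) 0 then cont + 1 else cont)
  else
    (if PySem.List.pyGetD lista i 0 > PySem.List.pyGetD lista (i - 1) 0 ∧
        PySem.List.pyGetD lista i 0 > PySem.List.pyGetD lista (i + 1) 0 then cont + 1 else cont)

def lacker (lista : List Int) : Bool :=
  let n : Int := lista.length
  let cont := (PySem.List.pyRange 0 n 1).foldl (stepA lista n) (0 : Int)
  cont == 1

-- ===== PORT B =====
-- B-side helper: the sign '<' / '>' / '=' of an adjacent pair
def signB (a b : Int) : String := if a < b then "<" else if a > b then ">" else "="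

def lacker_alt (lista : List Int) : Bool :=
  if lista.length = 0 then false
  else
    -- keys: run-length encoding (adjacent dedup) of the sign sequence
    let keys := (lista.zip (lista.drop 1)).foldl
      (fun keys p =>
        let s := signB p.1 p.2
        if keys = [] ∨ keys.getLast? ≠ some s then keys ++ [s] else keys) ([] : List String)
    let cont1 : Int := if PySem.List.pyGetD keys 0 "" = ">" then 1 else 0
    let cont2 : Int := cont1 + (keys.zip (keys.drop 1)).foldl
      (fun acc p => if p.1 = "<" ∧ p.2 = ">" then acc + 1 else acc) (0 : Int)
    let cont3 : Int := if PySem.List.pyGetD keys (-1) "" = "<" then cont2 + 1 else cont2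
    cont3 == 1

-- ===== PRECONDITION & SPEC =====
-- Pre_ excludes exactly single-element lists: there A raises IndexError (lista[1] at i = 0),
-- and B raises IndexError too (keys[0] on the empty sign list).
def Pre_lacker (lista : List Int) : Prop := lista.length ≠ 1
instance (lista : List Int) : Decidable (Pre_lacker lista) := by unfold Pre_lacker; infer_instance
def pvWitness_lacker : List Int := [1, 3, 2]

def Spec_lacker (lista : List Int) (out : Bool) : Prop := out = lacker_alt lista
instance (lista : List Int) (out : Bool) : Decidable (Spec_lacker lista out) := by unfold Spec_lacker; infer_instance

-- ===== CLAIM (what is proved, stated in full; the proofs are below) =====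
def Claim_equal_lacker : Prop := ∀ (lista : List Int), Dom_lacker lista → Pre_lacker lista → Spec_lacker lista (lacker lista)

-- ===== LEMMAS AND PROOFS =====

-- sign sequence of a list
def sgn (l : List Int) : List String := (l.zip (l.drop 1)).map (fun p => signB p.1 p.2)

-- recursive form of the run-length-encoded key sequence
def rleFrom (x : String) : List String → List String
  | [] => []
  | c :: t => if c = x then rleFrom x t else c :: rleFrom c t

def rleOf : List String → List String
  | [] => []
  | c :: t => c :: rleFrom c t

-- number of adjacent ('<', '>') pairs
def adjC (K : List String) : Nat := (K.zip (K.drop 1)).countP (fun p => p.1 == "<" && p.2 == ">")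

-- canonical peak count read off a sign sequence
def exprSgn (s : List String) : Int :=
  (if s.headD "" = ">" then (1 : Int) else 0) + (adjC s : Nat)
  + (if s.getLast? = some "<" then 1 else 0)

theorem signB_eq_gt (a b : Int) : (signB a b = ">") ↔ a > b := by
  unfold signB; split_ifs with h1 h2 <;> simp <;> omega

theorem signB_eq_lt (a b : Int) : (signB a b = "<") ↔ a < b := by
  unfold signB; split_ifs with h1 h2 <;> simp <;> omega

-- ---------- A side ----------
-- canonical index-based peak count; A's port reduces to it
def peakExpr (lista : List Int) : Int :=
  (if PySem.List.pyGetD lista 0 0 > PySem.List.pyGetD lista 1 0 then (1 : Int) else 0)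
  + (((PySem.List.pyRange 1 ((lista.length : Int) - 1) 1).countP
        (fun i => decide (PySem.List.pyGetD lista i 0 > PySem.List.pyGetD lista (i - 1) 0 ∧
                          PySem.List.pyGetD lista i 0 > PySem.List.pyGetD lista (i + 1) 0)) : Nat) : Int)
  + (if PySem.List.pyGetD lista ((lista.length : Int) - 1) 0 >
        PySem.List.pyGetD lista ((lista.length : Int) - 2) 0 then (1 : Int) else 0)

theorem lacker_val (lista : List Int) (h : 2 ≤ lista.length) :
    lacker lista = (peakExpr lista == 1) := by
  have hN : (2:Int) ≤ (lista.length : Int) := by exact_mod_cast h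
  simp only [lacker]
  refine congrArg (· == 1) ?_
  rw [PySem.List.pyRange_one_append 0 1 (lista.length : Int) (by omega) (by omega),
      PySem.List.pyRange_one_append 1 ((lista.length : Int) - 1) (lista.length : Int) (by omega) (by omega),
      show PySem.List.pyRange 0 1 1 = [(0:Int)] by simpa using PySem.List.pyRange_one_singleton 0,
      show PySem.List.pyRange ((lista.length : Int) - 1) (lista.length : Int) 1
          = [(lista.length : Int) - 1] by
        simpa using PySem.List.pyRange_one_singleton ((lista.length : Int) - 1),
      List.foldl_append, List.foldl_append, List.foldl_cons, List.foldl_nil, List.foldl_cons,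
      List.foldl_nil]
  have h0 : stepA lista (lista.length : Int) 0 0
      = (if PySem.List.pyGetD lista 0 0 > PySem.List.pyGetD lista 1 0 then (1:Int) else 0) := by
    simp only [stepA]; norm_num
  have hmid : List.foldl (stepA lista (lista.length : Int))
      (if PySem.List.pyGetD lista 0 0 > PySem.List.pyGetD lista 1 0 then (1:Int) else 0)
      (PySem.List.pyRange 1 ((lista.length : Int) - 1) 1)
      = List.foldl (fun acc i =>
          if PySem.List.pyGetD lista i 0 > PySem.List.pyGetD lista (i - 1) 0 ∧
             PySem.List.pyGetD lista i 0 > PySem.List.pyGetD lista (i + 1) 0 then acc + 1 else acc)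
        (if PySem.List.pyGetD lista 0 0 > PySem.List.pyGetD lista 1 0 then (1:Int) else 0)
        (PySem.List.pyRange 1 ((lista.length : Int) - 1) 1) := by
    refine PySem.List.foldl_congr_mem _ _ _ _ ?_
    intro acc i hi
    rw [PySem.List.mem_pyRange_one] at hi
    simp only [stepA]
    rw [if_neg (by omega), if_neg (by omega)]
  have hlast : ∀ c : Int, stepA lista (lista.length : Int) c ((lista.length : Int) - 1)
      = if PySem.List.pyGetD lista ((lista.length : Int) - 1) 0 >
           PySem.List.pyGetD lista ((lista.length : Int) - 2) 0 then c + 1 else c := by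
    intro c
    simp only [stepA]
    rw [if_neg (by omega), if_pos trivial,
        show (lista.length : Int) - 1 - 1 = (lista.length : Int) - 2 by omega]
  rw [h0, hmid, hlast, PySem.List.foldl_ite_add_one]
  unfold peakExpr
  split_ifs <;> omega

-- the interior count of peakExpr re-indexed over Nat
theorem mid_natCount (lista : List Int) :
    ((PySem.List.pyRange 1 ((lista.length : Int) - 1) 1).countP
        (fun i => decide (PySem.List.pyGetD lista i 0 > PySem.List.pyGetD lista (i - 1) 0 ∧
                          PySem.List.pyGetD lista i 0 > PySem.List.pyGetD lista (i + 1) 0)))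
    = (List.range (lista.length - 2)).countP
        (fun k => decide (lista.getD (k + 1) 0 > lista.getD k 0 ∧
                          lista.getD (k + 1) 0 > lista.getD (k + 2) 0)) := by
  rw [PySem.List.pyRange_one, List.countP_map]
  have hlen : ((lista.length : Int) - 1 - 1).toNat = lista.length - 2 := by omega
  rw [hlen]
  refine List.countP_congr ?_
  intro k hk
  have e1 : (1 : Int) + (k : Nat) = ((k + 1 : Nat) : Int) := by push_cast; ring
  have e2 : (1 : Int) + (k : Nat) - 1 = ((k : Nat) : Int) := by ring
  have e3 : (1 : Int) + (k : Nat) + 1 = ((k + 2 : Nat) : Int) := by push_cast; ring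
  simp only [Function.comp_apply, decide_eq_true_eq]
  rw [e2, e3, e1]
  simp only [PySem.List.pyGetD_natCast]

theorem natCount_eq_adjC (lista : List Int) :
    (List.range (lista.length - 2)).countP
        (fun k => decide (lista.getD (k + 1) 0 > lista.getD k 0 ∧
                          lista.getD (k + 1) 0 > lista.getD (k + 2) 0))
    = adjC (sgn lista) := by
  match lista with
  | [] => simp [sgn, adjC]
  | [a] => simp [sgn, adjC]
  | [a, b] => simp [sgn, adjC]
  | a :: b :: c :: t =>
      have hlen : (a :: b :: c :: t).length - 2 = ((b :: c :: t).length - 2) + 1 := by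
        simp
      rw [hlen, List.range_succ_eq_map, List.countP_cons, List.countP_map]
      have htail : ((List.range ((b :: c :: t).length - 2)).countP
          ((fun k => decide ((a :: b :: c :: t).getD (k + 1) 0 > (a :: b :: c :: t).getD k 0 ∧
              (a :: b :: c :: t).getD (k + 1) 0 > (a :: b :: c :: t).getD (k + 2) 0)) ∘ Nat.succ))
          = (List.range ((b :: c :: t).length - 2)).countP
              (fun k => decide ((b :: c :: t).getD (k + 1) 0 > (b :: c :: t).getD k 0 ∧
                  (b :: c :: t).getD (k + 1) 0 > (b :: c :: t).getD (k + 2) 0)) := by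
        refine List.countP_congr ?_
        intro k _
        simp [Function.comp]
      rw [htail, natCount_eq_adjC (b :: c :: t)]
      have hsgn : sgn (a :: b :: c :: t) = signB a b :: signB b c :: sgn (c :: t) := by
        simp [sgn]
      have hsgn' : sgn (b :: c :: t) = signB b c :: sgn (c :: t) := by simp [sgn]
      rw [hsgn, hsgn']
      simp only [adjC, List.drop_succ_cons, List.drop_zero, List.zip_cons_cons, List.countP_cons]
      have hl : (signB a b == "<") = decide (a < b) := by
        by_cases h : a < b
        · simp [h, (signB_eq_lt a b).2 h]
        · have hne : signB a b ≠ "<" := fun hc => h ((signB_eq_lt a b).1 hc)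
          simp [h, hne]
      have hg : (signB b c == ">") = decide (b > c) := by
        by_cases h : b > c
        · simp [h, (signB_eq_gt b c).2 h]
        · have hne : signB b c ≠ ">" := fun hc => h ((signB_eq_gt b c).1 hc)
          simp [h, hne]
      rw [hl, hg]
      simp [Bool.decide_and, gt_iff_lt]

theorem sgn_getLast : ∀ (lista : List Int), 2 ≤ lista.length →
    (sgn lista).getLast? = some (signB (lista.getD (lista.length - 2) 0)
                                       (lista.getD (lista.length - 1) 0))
  | [a, b], _ => rfl
  | a :: b :: c :: t, _ => by
      have ih := sgn_getLast (b :: c :: t) (by simp)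
      have hs2 : sgn (a :: b :: c :: t) = signB a b :: sgn (b :: c :: t) := by simp [sgn]
      have hs3 : sgn (b :: c :: t) = signB b c :: sgn (c :: t) := by simp [sgn]
      have e1 : (a :: b :: c :: t).getD ((a :: b :: c :: t).length - 2) 0
          = (b :: c :: t).getD ((b :: c :: t).length - 2) 0 := by
        have h : (a :: b :: c :: t).length - 2 = ((b :: c :: t).length - 2) + 1 := by
          simp
        rw [h, List.getD_cons_succ]
      have e2 : (a :: b :: c :: t).getD ((a :: b :: c :: t).length - 1) 0
          = (b :: c :: t).getD ((b :: c :: t).length - 1) 0 := by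
        have h : (a :: b :: c :: t).length - 1 = ((b :: c :: t).length - 1) + 1 := by
          simp
        rw [h, List.getD_cons_succ]
      rw [hs2, hs3, List.getLast?_cons_cons, ← hs3, ih, e1, e2]

theorem peakExpr_eq_exprSgn (lista : List Int) (h : 2 ≤ lista.length) :
    peakExpr lista = exprSgn (sgn lista) := by
  have hN : (2:Int) ≤ (lista.length : Int) := by exact_mod_cast h
  unfold peakExpr exprSgn
  have hhead : (PySem.List.pyGetD lista 0 0 > PySem.List.pyGetD lista 1 0)
      ↔ ((sgn lista).headD "" = ">") := by
    match lista, h with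
    | a :: b :: r, _ =>
        have g0 : PySem.List.pyGetD (a :: b :: r) 0 0 = a := by
          simp [PySem.List.pyGetD_zero]
        have g1 : PySem.List.pyGetD (a :: b :: r) 1 0 = b := by
          rw [show (1 : Int) = ((1 : Nat) : Int) by norm_num, PySem.List.pyGetD_natCast]
          rfl
        rw [g0, g1, show (sgn (a :: b :: r)).headD "" = signB a b by simp [sgn], signB_eq_gt]
  have hlast : (PySem.List.pyGetD lista ((lista.length : Int) - 1) 0 >
        PySem.List.pyGetD lista ((lista.length : Int) - 2) 0)
      ↔ ((sgn lista).getLast? = some "<") := by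
    rw [sgn_getLast lista h]
    have e1 : PySem.List.pyGetD lista ((lista.length : Int) - 1) 0
        = lista.getD (lista.length - 1) 0 := by
      rw [show (lista.length : Int) - 1 = ((lista.length - 1 : Nat) : Int) by omega,
          PySem.List.pyGetD_natCast]
    have e2 : PySem.List.pyGetD lista ((lista.length : Int) - 2) 0
        = lista.getD (lista.length - 2) 0 := by
      rw [show (lista.length : Int) - 2 = ((lista.length - 2 : Nat) : Int) by omega,
          PySem.List.pyGetD_natCast]
    rw [e1, e2, Option.some_inj, signB_eq_lt]
  rw [mid_natCount, natCount_eq_adjC, if_congr hhead rfl rfl, if_congr hlast rfl rfl]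

-- ---------- B side ----------
-- the foldl that builds keys equals the recursive run-length encoding
theorem build_rleFrom (ss : List String) : ∀ (pre : List String) (x : String),
    ss.foldl (fun keys s =>
        if keys = [] ∨ keys.getLast? ≠ some s then keys ++ [s] else keys) (pre ++ [x])
      = pre ++ x :: rleFrom x ss := by
  induction ss with
  | nil => intro pre x; simp [rleFrom]
  | cons c t ih =>
      intro pre x
      simp only [List.foldl_cons]
      have hstep : rleFrom x (c :: t) = if c = x then rleFrom x t else c :: rleFrom c t := rfl
      by_cases hc : c = x
      · subst hc
        rw [if_neg (by simp)]
        rw [ih pre c, hstep, if_pos rfl]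
      · rw [if_pos (by simp [Ne.symm hc])]
        rw [ih (pre ++ [x]) c, hstep, if_neg hc]
        simp

theorem build_rleOf (ss : List String) :
    ss.foldl (fun keys s =>
        if keys = [] ∨ keys.getLast? ≠ some s then keys ++ [s] else keys) []
      = rleOf ss := by
  match ss with
  | [] => rfl
  | c :: t =>
      simp only [List.foldl_cons]
      have := build_rleFrom t [] c
      simpa [rleOf] using this

theorem rleFrom_getLast? (t : List String) : ∀ (x : String),
    (x :: rleFrom x t).getLast? = (x :: t).getLast? := by
  induction t with
  | nil => intro x; rfl
  | cons y t' ih =>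
      intro x
      have hstep : rleFrom x (y :: t') = if y = x then rleFrom x t' else y :: rleFrom y t' :=
        rfl
      by_cases h : y = x
      · subst h
        rw [hstep, if_pos rfl, ih y, List.getLast?_cons_cons]
      · rw [hstep, if_neg h, List.getLast?_cons_cons, ih y, List.getLast?_cons_cons]

theorem rleFrom_adjC (t : List String) : ∀ (x : String),
    adjC (x :: rleFrom x t) = adjC (x :: t) := by
  induction t with
  | nil => intro x; rfl
  | cons y t' ih =>
      intro x
      have hstep : rleFrom x (y :: t') = if y = x then rleFrom x t' else y :: rleFrom y t' :=
        rfl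
      by_cases h : y = x
      · subst h
        rw [hstep, if_pos rfl, ih y]
        simp [adjC, List.countP_cons]
        intro h
        subst h
        decide
      · rw [hstep, if_neg h]
        have hsplit : ∀ (L : List String), adjC (x :: y :: L)
            = (if (x == "<" && y == ">") then 1 else 0) + adjC (y :: L) := by
          intro L
          simp [adjC, List.countP_cons]
          split_ifs <;> omega
        rw [hsplit (rleFrom y t'), ih y, hsplit t']

theorem exprSgn_rleOf (s : List String) (h : s ≠ []) :
    exprSgn (rleOf s) = exprSgn s := by
  match s with
  | c :: t =>
      unfold exprSgn
      rw [show rleOf (c :: t) = c :: rleFrom c t from rfl,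
          rleFrom_getLast? t c, rleFrom_adjC t c]
      simp only [List.headD_cons]
      rfl

theorem judge_eq (K : List String) (hne : K ≠ []) :
    (if PySem.List.pyGetD K (-1) "" = "<" then
        ((if PySem.List.pyGetD K 0 "" = ">" then (1 : Int) else 0)
          + (K.zip (K.drop 1)).foldl
              (fun acc p => if p.1 = "<" ∧ p.2 = ">" then acc + 1 else acc) (0 : Int)) + 1
      else (if PySem.List.pyGetD K 0 "" = ">" then (1 : Int) else 0)
          + (K.zip (K.drop 1)).foldl
              (fun acc p => if p.1 = "<" ∧ p.2 = ">" then acc + 1 else acc) (0 : Int))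
    = exprSgn K := by
  have hget0 : PySem.List.pyGetD K 0 "" = K.headD "" := by
    rw [PySem.List.pyGetD_zero]
    cases K <;> rfl
  have hgetm1 : (PySem.List.pyGetD K (-1) "" = "<") ↔ (K.getLast? = some "<") := by
    rw [PySem.List.pyGetD_neg_one (h := hne), List.getLast?_eq_some_getLast hne, Option.some_inj]
  have hfold : (K.zip (K.drop 1)).foldl
      (fun acc p => if p.1 = "<" ∧ p.2 = ">" then acc + 1 else acc) (0 : Int)
      = (adjC K : Int) := by
    rw [PySem.List.foldl_ite_add_one]
    unfold adjC
    have hc : (K.zip (K.drop 1)).countP (fun p => decide (p.1 = "<" ∧ p.2 = ">"))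
        = (K.zip (K.drop 1)).countP (fun p => p.1 == "<" && p.2 == ">") := by
      refine List.countP_congr ?_
      intro p _
      simp
    rw [hc]
    omega
  rw [hget0, hfold, if_congr hgetm1 rfl rfl]
  unfold exprSgn
  split_ifs <;> omega

theorem lacker_alt_val (lista : List Int) (h : 2 ≤ lista.length) :
    lacker_alt lista = (exprSgn (rleOf (sgn lista)) == 1) := by
  have hkeys : (lista.zip (lista.drop 1)).foldl
      (fun keys p =>
        let s := signB p.1 p.2
        if keys = [] ∨ keys.getLast? ≠ some s then keys ++ [s] else keys) ([] : List String)
      = rleOf (sgn lista) := by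
    simp only [sgn]
    rw [← build_rleOf ((lista.zip (lista.drop 1)).map (fun p => signB p.1 p.2)),
        List.foldl_map]
  have hne : rleOf (sgn lista) ≠ [] := by
    match lista, h with
    | a :: b :: r, _ =>
        have : sgn (a :: b :: r) = signB a b :: sgn (b :: r) := by simp [sgn]
        rw [this]
        simp [rleOf]
  simp only [lacker_alt]
  rw [if_neg (by omega), hkeys, judge_eq _ hne]

theorem lacker_alt_final (lista : List Int) (h : 2 ≤ lista.length) :
    lacker_alt lista = (exprSgn (sgn lista) == 1) := by
  rw [lacker_alt_val lista h, exprSgn_rleOf]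
  match lista, h with
  | a :: b :: r, _ =>
      have : sgn (a :: b :: r) = signB a b :: sgn (b :: r) := by simp [sgn]
      rw [this]
      simp

-- ===== VERDICT (by name: the statement is the Claim_ definition above) =====
theorem lacker_spec : Claim_equal_lacker := by
  intro lista _ hpre
  unfold Spec_lacker
  match hl : lista with
  | [] => decide
  | [x] => simp [Pre_lacker] at hpre
  | x :: y :: rest =>
      rw [lacker_val _ (by simp), lacker_alt_final _ (by simp),
          peakExpr_eq_exprSgn _ (by simp)]
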